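-- pv_equiv track=rewrite | github.com/ErnirEli/Linuleg | Skil 1/template_01.py | is_onto
-- ===== SOURCE A (Python) =====
-- def is_onto(f, D, C):
--     f: dict
--     D: set
--     C: set
--
--     for _input, _output in f.items():
--         if _input not in D or _output not in C:
--             return False
--
--     return True
-- ===== SOURCE B (Python) =====
-- def _sorted_subset(xs, ys):
--     # two-pointer merge scan over two ascending lists: is xs a sub-multiset-free subset of ys?
--     i = 0
--     for x in xs:
--         while i < len(ys) and ys[i] < x:
--             i += 1
--         if i == len(ys) or ys[i] != x:
--             return False
--     return True
--
--
-- def is_onto(f, D, C):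
--     return (_sorted_subset(sorted(f.keys()), sorted(D))
--             and _sorted_subset(sorted(set(f.values())), sorted(C)))
-- ===== Notes on version B (the rewrite author's own statement) =====
-- stated objective: alternative
-- what changed: Replaces the per-pair hash-membership loop with sort-then-merge: both sides are sorted and containment is decided by a two-pointer merge scan over the ordered lists, no membership tests at all.
import Mathlib
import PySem

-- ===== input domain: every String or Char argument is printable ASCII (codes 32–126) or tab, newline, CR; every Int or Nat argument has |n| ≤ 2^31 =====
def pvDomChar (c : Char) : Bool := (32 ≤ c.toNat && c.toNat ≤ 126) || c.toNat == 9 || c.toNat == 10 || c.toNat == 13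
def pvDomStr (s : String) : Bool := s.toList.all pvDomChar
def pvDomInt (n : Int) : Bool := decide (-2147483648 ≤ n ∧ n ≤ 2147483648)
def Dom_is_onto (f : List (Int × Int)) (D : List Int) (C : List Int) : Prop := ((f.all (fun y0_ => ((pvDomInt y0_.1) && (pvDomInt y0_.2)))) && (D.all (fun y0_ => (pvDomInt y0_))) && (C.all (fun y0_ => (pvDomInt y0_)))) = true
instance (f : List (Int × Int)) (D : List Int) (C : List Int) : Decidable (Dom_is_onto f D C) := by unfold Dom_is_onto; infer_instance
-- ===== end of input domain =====

-- B replaces A's per-pair membership loop with sort-then-merge: sort both sides and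
-- decide containment by a two-pointer merge scan over the ordered lists; objective: alternative.

-- ===== PORT A =====
-- the for-loop over f.items() with early `return False`
def isOntoGo (D C : List Int) : List (Int × Int) → Bool
  | [] => true
  | (i, o) :: rest =>
      if !(PySem.Set.contains D i) || !(PySem.Set.contains C o) then false
      else isOntoGo D C rest

def is_onto (f : List (Int × Int)) (D : List Int) (C : List Int) : Bool :=
  isOntoGo D C f

-- ===== PORT B =====
-- _sorted_subset: the two-pointer loop (advance the ys pointer while ys[i] < x,
-- then demand ys[i] == x), written as the obvious recursion over the two lists
def sortedSubset : List Int → List Int → Bool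
  | [], _ => true
  | _ :: _, [] => false
  | x :: xs, y :: ys =>
      if y < x then sortedSubset (x :: xs) ys        -- while ys[i] < x: i += 1
      else if x = y then sortedSubset xs (y :: ys)   -- matched, next x (pointer stays)
      else false                                     -- i == len(ys) handled by the [] case
termination_by xs ys => xs.length + ys.length

def is_onto_alt (f : List (Int × Int)) (D : List Int) (C : List Int) : Bool :=
  sortedSubset (PySem.List.sorted (f.map Prod.fst) (fun x => x) false)
               (PySem.List.sorted D (fun x => x) false) &&
  sortedSubset (PySem.List.sorted (PySem.Set.ofList (f.map Prod.snd)) (fun x => x) false)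
               (PySem.List.sorted C (fun x => x) false)

-- ===== PRECONDITION & SPEC =====
def Spec_is_onto (f : List (Int × Int)) (D : List Int) (C : List Int) (out : Bool) : Prop := out = is_onto_alt f D C
instance (f : List (Int × Int)) (D : List Int) (C : List Int) (out : Bool) : Decidable (Spec_is_onto f D C out) := by unfold Spec_is_onto; infer_instance

-- ===== CLAIM (what is proved, stated in full; the proofs are below) =====
def Claim_equal_is_onto : Prop := ∀ (f : List (Int × Int)) (D : List Int) (C : List Int), Dom_is_onto f D C → Spec_is_onto f D C (is_onto f D C)

-- ===== LEMMAS AND PROOFS =====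
theorem isOntoGo_eq_true_iff (D C : List Int) (f : List (Int × Int)) :
    isOntoGo D C f = true ↔ ∀ p ∈ f, p.1 ∈ D ∧ p.2 ∈ C := by
  induction f with
  | nil => simp [isOntoGo]
  | cons p rest ih =>
      obtain ⟨i, o⟩ := p
      by_cases hd : i ∈ D <;> by_cases hc : o ∈ C <;>
        simp [isOntoGo, hd, hc, ih]

-- the merge scan decides subset on ascending lists
theorem sortedSubset_iff (xs ys : List Int) (hx : xs.Pairwise (· ≤ ·))
    (hy : ys.Pairwise (· ≤ ·)) :
    sortedSubset xs ys = true ↔ ∀ a ∈ xs, a ∈ ys := by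
  induction xs, ys using sortedSubset.induct with
  | case1 ys => simp [sortedSubset]
  | case2 x xs =>
      rw [sortedSubset]
      refine iff_of_false (by simp) fun h => ?_
      exact List.not_mem_nil (h x List.mem_cons_self)
  | case3 x xs y ys hlt ih =>
      rw [sortedSubset, if_pos hlt,
        ih hx (hy.sublist (List.sublist_cons_self _ _))]
      constructor
      · intro h a ha
        exact List.mem_cons_of_mem _ (h a ha)
      · intro h a ha
        have hxa : x ≤ a := by
          rcases List.mem_cons.mp ha with rfl | ha'
          · exact le_refl _
          · exact (List.pairwise_cons.mp hx).1 a ha'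
        rcases List.mem_cons.mp (h a ha) with rfl | h'
        · omega
        · exact h'
  | case4 xs y ys hlt ih =>
      rw [sortedSubset, if_neg hlt, if_pos rfl,
        ih (hx.sublist (List.sublist_cons_self _ _)) hy]
      constructor
      · intro h a ha
        rcases List.mem_cons.mp ha with rfl | ha'
        · exact List.mem_cons_self
        · exact h a ha'
      · intro h a ha
        exact h a (List.mem_cons_of_mem _ ha)
  | case5 x xs y ys hlt heq =>
      rw [sortedSubset, if_neg hlt, if_neg heq]
      refine iff_of_false (by simp) fun h => ?_
      have hx' : x ∈ y :: ys := h x List.mem_cons_self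
      rcases List.mem_cons.mp hx' with rfl | h'
      · exact heq rfl
      · have := (List.pairwise_cons.mp hy).1 x h'
        omega

theorem sortedSubset_sorted_iff (xs ys : List Int) :
    sortedSubset (PySem.List.sorted xs (fun x => x) false)
                 (PySem.List.sorted ys (fun x => x) false) = true ↔ ∀ a ∈ xs, a ∈ ys := by
  rw [sortedSubset_iff _ _ (PySem.List.sorted_pairwise xs (fun x => x))
      (PySem.List.sorted_pairwise ys (fun x => x))]
  simp [PySem.List.mem_sorted]

-- ===== VERDICT (by name: the statement is the Claim_ definition above) =====
theorem is_onto_spec : Claim_equal_is_onto := by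
  intro f D C _
  unfold Spec_is_onto is_onto is_onto_alt
  rw [Bool.eq_iff_iff, isOntoGo_eq_true_iff]
  simp only [Bool.and_eq_true, sortedSubset_sorted_iff, PySem.Set.mem_ofList, List.mem_map]
  constructor
  · intro h
    refine ⟨?_, ?_⟩
    · rintro x ⟨p, hp, rfl⟩; exact (h p hp).1
    · rintro v ⟨p, hp, rfl⟩; exact (h p hp).2
  · rintro ⟨h1, h2⟩ p hp
    exact ⟨h1 p.1 ⟨p, hp, rfl⟩, h2 p.2 ⟨p, hp, rfl⟩⟩
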